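-- pv_equiv track=rewrite | github.com/UnitedCTF/UnitedCTF2024 | challenges/programming/pre-caisse-2/solution/solution.py | parse_str_operation
-- ===== SOURCE A (Python) =====
-- str_operations = { 'plus' : '+',
--                 'minus' : '-',
--                 'times' : '*',
--                 'divided' : '/'}
--
-- str_num = { 'zero' : 0,
--             'one' : 1,
--             'two' : 2,
--             'three' : 3,
--             'four' : 4,
--             'five' : 5,
--             'six' : 6,
--             'seven' : 7,
--             'eight' : 8,
--             'nine' : 9,
--             'ten' : 10,
--             'eleven' : 11,
--             'twelve' : 12,
--             'thirteen' : 13,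
--             'fourteen' : 14,
--             'fifteen' : 15,
--             'sixteen' : 16,
--             'seventeen' : 17,
--             'eighteen' : 18,
--             'nineteen' : 19,
--             'twenty' : 20,
--             'thirty' : 30,
--             'forty' : 40,
--             'fifty' : 50,
--             'sixty' : 60,
--             'seventy' : 70,
--             'eighty' : 80,
--             'ninety' : 90,
--             'hundred' : 100 }
--
-- def parse_str_to_number(s, is_hundred=False):
--     return str_num.get(s, 0) * (100 if is_hundred else 1)
--
-- def parse_str_operation(str_op):
--     elements = str_op.split()
--     n1, n2 = 0, 0
--     op = None
--     is_n2_found = False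
--     is_hundred = False
--
--     for el in reversed(elements[:-2]):
--         if el == 'by':
--             continue
--         if el == 'hundred':
--             is_hundred = True
--             continue
--
--         if el in str_operations:
--             op = str_operations[el]
--             is_n2_found = True
--         else:
--             if is_n2_found:
--                 n1 += parse_str_to_number(el, is_hundred)
--             else:
--                 n2 += parse_str_to_number(el, is_hundred)
--             is_hundred = False
--
--     return n1, op, n2
-- ===== SOURCE B (Python) =====
-- str_operations = { 'plus' : '+',
--                 'minus' : '-',
--                 'times' : '*',
--                 'divided' : '/'}
--
-- str_num = { 'zero' : 0,
--             'one' : 1,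
--             'two' : 2,
--             'three' : 3,
--             'four' : 4,
--             'five' : 5,
--             'six' : 6,
--             'seven' : 7,
--             'eight' : 8,
--             'nine' : 9,
--             'ten' : 10,
--             'eleven' : 11,
--             'twelve' : 12,
--             'thirteen' : 13,
--             'fourteen' : 14,
--             'fifteen' : 15,
--             'sixteen' : 16,
--             'seventeen' : 17,
--             'eighteen' : 18,
--             'nineteen' : 19,
--             'twenty' : 20,
--             'thirty' : 30,
--             'forty' : 40,
--             'fifty' : 50,
--             'sixty' : 60,
--             'seventy' : 70,
--             'eighty' : 80,
--             'ninety' : 90,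
--             'hundred' : 100 }
--
-- def parse_str_operation(str_op):
--     # single FORWARD pass; a pending number is kept open until the next plain
--     # word so that a later 'hundred' can still scale it, and everything seen
--     # before an operator is shifted into n1
--     n1, n2 = 0, 0
--     op = None
--     pending = None  # (value, already_multiplied, goes_to_n1)
--     for w in str_op.split()[:-2]:
--         if w == 'by':
--             continue
--         if w == 'hundred':
--             if pending is not None and not pending[1]:
--                 pending = (pending[0] * 100, True, pending[2])
--             continue
--         if w in str_operations:
--             if op is None:
--                 op = str_operations[w]
--             n1 += n2
--             n2 = 0
--             if pending is not None:
--                 pending = (pending[0], pending[1], True)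
--             continue
--         if pending is not None:
--             if pending[2]:
--                 n1 += pending[0]
--             else:
--                 n2 += pending[0]
--         pending = (str_num.get(w, 0), False, False)
--     if pending is not None:
--         if pending[2]:
--             n1 += pending[0]
--         else:
--             n2 += pending[0]
--     return n1, op, n2
-- ===== Notes on version B (the rewrite author's own statement) =====
-- stated objective: alternative
-- what changed: A scans the truncated token list backwards with found/is_hundred flags; B makes a single forward pass keeping a pending number (value, already-multiplied, goes-to-n1) that stays open for a later 'hundred', shifting the running n2 into n1 whenever an operator word appears.
import Mathlib
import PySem

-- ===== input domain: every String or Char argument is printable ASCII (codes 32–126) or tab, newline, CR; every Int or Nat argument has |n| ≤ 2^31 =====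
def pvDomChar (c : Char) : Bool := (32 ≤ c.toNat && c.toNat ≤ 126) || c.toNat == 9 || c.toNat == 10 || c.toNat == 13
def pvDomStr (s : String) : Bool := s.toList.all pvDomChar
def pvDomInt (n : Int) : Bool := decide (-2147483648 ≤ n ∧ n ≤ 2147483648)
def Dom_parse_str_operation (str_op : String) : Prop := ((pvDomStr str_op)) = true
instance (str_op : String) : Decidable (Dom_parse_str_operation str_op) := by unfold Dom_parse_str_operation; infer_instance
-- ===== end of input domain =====

-- B replaces A's single backward scan (with found/hundred flags) by a single forward
-- scan with a pending-number accumulator: same cost, a different decomposition ("alternative").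

-- shared module-level constants (the two Python dicts)
def strOperationsD : PySem.Dict String String :=
  PySem.Dict.ofList [("plus", "+"), ("minus", "-"), ("times", "*"), ("divided", "/")]

def strNumD : PySem.Dict String Int :=
  PySem.Dict.ofList [("zero", 0), ("one", 1), ("two", 2), ("three", 3), ("four", 4),
    ("five", 5), ("six", 6), ("seven", 7), ("eight", 8), ("nine", 9), ("ten", 10),
    ("eleven", 11), ("twelve", 12), ("thirteen", 13), ("fourteen", 14), ("fifteen", 15),
    ("sixteen", 16), ("seventeen", 17), ("eighteen", 18), ("nineteen", 19), ("twenty", 20),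
    ("thirty", 30), ("forty", 40), ("fifty", 50), ("sixty", 60), ("seventy", 70),
    ("eighty", 80), ("ninety", 90), ("hundred", 100)]

-- ===== PORT A =====
structure AState where
  n1 : Int
  n2 : Int
  op : Option String
  found : Bool
  hund : Bool
deriving Repr, DecidableEq

def parse_str_to_number (s : String) (is_hundred : Bool) : Int :=
  PySem.Dict.getD strNumD s 0 * (if is_hundred then 100 else 1)

def stepA (st : AState) (el : String) : AState :=
  if el = "by" then st
  else if el = "hundred" then { st with hund := true }
  else
    match PySem.Dict.get? strOperationsD el with
    | some v => { st with op := some v, found := true }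
    | none =>
      if st.found then { st with n1 := st.n1 + parse_str_to_number el st.hund, hund := false }
      else { st with n2 := st.n2 + parse_str_to_number el st.hund, hund := false }

def parse_str_operation (str_op : String) : Int × Option String × Int :=
  let elements := PySem.Str.split₀ str_op
  let st := (PySem.List.slice elements none (some (-2))).reverse.foldl stepA ⟨0, 0, none, false, false⟩
  (st.n1, st.op, st.n2)

-- ===== PORT B =====
structure BState where
  n1 : Int
  n2 : Int
  op : Option String
  pending : Option (Int × Bool × Bool)   -- (value, already_multiplied, goes_to_n1)
deriving Repr, DecidableEq

def commitPending (st : BState) : BState :=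
  match st.pending with
  | none => st
  | some (v, _, d) =>
    if d then { st with n1 := st.n1 + v, pending := none }
    else { st with n2 := st.n2 + v, pending := none }

def stepB (st : BState) (w : String) : BState :=
  if w = "by" then st
  else if w = "hundred" then
    match st.pending with
    | none => st
    | some (v, m, d) => if m then st else { st with pending := some (v * 100, true, d) }
  else
    match PySem.Dict.get? strOperationsD w with
    | some v =>
      { st with op := some (st.op.getD v), n1 := st.n1 + st.n2, n2 := 0,
                pending := st.pending.map (fun p => (p.1, p.2.1, true)) }
    | none =>
      let st' := commitPending st
      { st' with pending := some (PySem.Dict.getD strNumD w 0, false, false) }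

def parse_str_operation_alt (str_op : String) : Int × Option String × Int :=
  let st := commitPending
    ((PySem.List.slice (PySem.Str.split₀ str_op) none (some (-2))).foldl stepB ⟨0, 0, none, none⟩)
  (st.n1, st.op, st.n2)

-- ===== PRECONDITION & SPEC =====
def Spec_parse_str_operation (str_op : String) (out : Int × Option String × Int) : Prop := out = parse_str_operation_alt str_op
instance (str_op : String) (out : Int × Option String × Int) : Decidable (Spec_parse_str_operation str_op out) := by unfold Spec_parse_str_operation; infer_instance

-- ===== CLAIM (what is proved, stated in full; the proofs are below) =====
def Claim_equal_parse_str_operation : Prop := ∀ (str_op : String), Dom_parse_str_operation str_op → Spec_parse_str_operation str_op (parse_str_operation str_op)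

-- ===== LEMMAS AND PROOFS =====

-- does the list contain an operator word?
def hasOpL (l : List String) : Bool := l.any fun w => (PySem.Dict.get? strOperationsD w).isSome

-- is the first token that is neither 'by' nor an operator word equal to 'hundred'?
def HL : List String → Bool
  | [] => false
  | w :: ts =>
    if w = "by" then HL ts
    else if w = "hundred" then true
    else if (PySem.Dict.get? strOperationsD w).isSome then HL ts else false

def foldA (l : List String) : AState := l.reverse.foldl stepA ⟨0, 0, none, false, false⟩

lemma get?_by : PySem.Dict.get? strOperationsD "by" = none := rfl

lemma get?_hundred : PySem.Dict.get? strOperationsD "hundred" = none := rfl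

lemma hasOpL_cons (w : String) (ts : List String) :
    hasOpL (w :: ts) = ((PySem.Dict.get? strOperationsD w).isSome || hasOpL ts) := by
  simp [hasOpL]

def finB (st : BState) (ts : List String) : Int × Option String × Int :=
  let r := commitPending (ts.foldl stepB st)
  (r.n1, r.op, r.n2)

lemma foldA_cons (t : String) (ts : List String) : foldA (t :: ts) = stepA (foldA ts) t := by
  simp [foldA, List.foldl_append]

lemma foldA_found (l : List String) : (foldA l).found = hasOpL l := by
  induction l with
  | nil => rfl
  | cons t ts ih =>
    rw [foldA_cons, stepA, hasOpL_cons]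
    by_cases hby : t = "by"
    · subst hby; simp [get?_by, ih]
    by_cases hh : t = "hundred"
    · subst hh; simp [hby, get?_hundred, ih]
    simp only [if_neg hby, if_neg hh]
    cases hop : PySem.Dict.get? strOperationsD t with
    | some v => simp [hop]
    | none =>
      by_cases hf : (foldA ts).found
      · simp only [if_pos hf, hop]
        simp [← ih, hf]
      · simp only [if_neg hf, hop]
        simp only [Option.isSome_none, Bool.false_or, ← ih]

lemma foldA_hund (l : List String) : (foldA l).hund = HL l := by
  induction l with
  | nil => rfl
  | cons t ts ih =>
    rw [foldA_cons, stepA]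
    by_cases hby : t = "by"
    · simp [hby, HL, ih]
    by_cases hh : t = "hundred"
    · simp [hby, hh, HL]
    simp only [if_neg hby, if_neg hh]
    cases hop : PySem.Dict.get? strOperationsD t with
    | some v => simp [HL, hby, hh, hop, ih]
    | none =>
      by_cases hf : (foldA ts).found <;> simp [hf, HL, hby, hh, hop]

lemma finB_cons (st : BState) (w : String) (ts : List String) :
    finB st (w :: ts) = finB (stepB st w) ts := rfl

lemma finB_n1_add (ts : List String) (n1 n2 : Int) (o : Option String)
    (p : Option (Int × Bool × Bool)) (c : Int) :
    finB ⟨n1 + c, n2, o, p⟩ ts =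
      ((finB ⟨n1, n2, o, p⟩ ts).1 + c, (finB ⟨n1, n2, o, p⟩ ts).2.1, (finB ⟨n1, n2, o, p⟩ ts).2.2) := by
  induction ts generalizing n1 n2 o p with
  | nil =>
    cases p with
    | none => rfl
    | some q =>
      obtain ⟨v, m, d⟩ := q
      by_cases hd : d <;> simp [finB, commitPending, hd] <;> ring
  | cons w ts ih =>
    rw [finB_cons, finB_cons, stepB, stepB]
    by_cases hby : w = "by"
    · simp [hby, ih]
    by_cases hh : w = "hundred"
    · simp only [if_neg hby, hh, if_pos rfl]
      cases p with
      | none => exact ih _ _ _ _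
      | some q =>
        obtain ⟨v, m, d⟩ := q
        by_cases hm : m <;> simp [hm, ih]
    simp only [if_neg hby, if_neg hh]
    cases hop : PySem.Dict.get? strOperationsD w with
    | some v =>
      have : n1 + c + n2 = n1 + n2 + c := by ring
      simp [this, ih]
    | none =>
      cases p with
      | none => simp [commitPending, ih]
      | some q =>
        obtain ⟨v, m, d⟩ := q
        by_cases hd : d
        · have : n1 + c + v = n1 + v + c := by ring
          simp [commitPending, hd, this, ih]
        · simp [commitPending, hd, ih]

lemma finB_n2_add (ts : List String) (n1 n2 : Int) (o : Option String)
    (p : Option (Int × Bool × Bool)) (c : Int) :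
    finB ⟨n1, n2 + c, o, p⟩ ts =
      (if hasOpL ts then
        ((finB ⟨n1, n2, o, p⟩ ts).1 + c, (finB ⟨n1, n2, o, p⟩ ts).2.1, (finB ⟨n1, n2, o, p⟩ ts).2.2)
      else
        ((finB ⟨n1, n2, o, p⟩ ts).1, (finB ⟨n1, n2, o, p⟩ ts).2.1, (finB ⟨n1, n2, o, p⟩ ts).2.2 + c)) := by
  induction ts generalizing n1 n2 o p with
  | nil =>
    cases p with
    | none => rfl
    | some q =>
      obtain ⟨v, m, d⟩ := q
      by_cases hd : d <;> simp [finB, commitPending, hasOpL, hd] <;> ring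
  | cons w ts ih =>
    rw [finB_cons, finB_cons, stepB, stepB]
    rw [hasOpL_cons]
    by_cases hby : w = "by"
    · subst hby; simp [get?_by, ih]
    by_cases hh : w = "hundred"
    · subst hh
      simp only [if_neg hby, if_pos rfl, get?_hundred, Option.isSome_none, Bool.false_or]
      cases p with
      | none => exact ih n1 n2 o none
      | some q =>
        obtain ⟨v, m, d⟩ := q
        by_cases hm : m <;> simp [hm, ih]
    simp only [if_neg hby, if_neg hh]
    cases hop : PySem.Dict.get? strOperationsD w with
    | some v =>
      have : n1 + (n2 + c) = n1 + n2 + c := by ring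
      simp [this, finB_n1_add, hop]
    | none =>
      cases p with
      | none => simp [commitPending, ih, hop]
      | some q =>
        obtain ⟨v, m, d⟩ := q
        by_cases hd : d
        · simp [commitPending, hd, ih, hop]
        · have : n2 + c + v = n2 + v + c := by ring
          simp [commitPending, hd, this, ih, hop]

lemma finB_op_some (ts : List String) (n1 n2 : Int) (p : Option (Int × Bool × Bool)) (o : String) :
    finB ⟨n1, n2, some o, p⟩ ts =
      ((finB ⟨n1, n2, none, p⟩ ts).1, some o, (finB ⟨n1, n2, none, p⟩ ts).2.2) := by
  induction ts generalizing n1 n2 p o with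
  | nil =>
    cases p with
    | none => rfl
    | some q =>
      obtain ⟨v, m, d⟩ := q
      by_cases hd : d <;> simp [finB, commitPending, hd]
  | cons w ts ih =>
    rw [finB_cons, finB_cons, stepB, stepB]
    by_cases hby : w = "by"
    · simp [hby, ih]
    by_cases hh : w = "hundred"
    · simp only [if_neg hby, hh, if_pos rfl]
      cases p with
      | none => exact ih _ _ _ _
      | some q =>
        obtain ⟨v, m, d⟩ := q
        by_cases hm : m <;> simp [hm, ih]
    simp only [if_neg hby, if_neg hh]
    cases hop : PySem.Dict.get? strOperationsD w with
    | some v => simp [ih]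
    | none =>
      cases p with
      | none => simp [commitPending, ih]
      | some q =>
        obtain ⟨v, m, d⟩ := q
        by_cases hd : d <;> simp [commitPending, hd, ih]

lemma finB_pending (ts : List String) (n1 n2 : Int) (o : Option String)
    (v : Int) (m d : Bool) :
    finB ⟨n1, n2, o, some (v, m, d)⟩ ts =
      (let r := finB ⟨n1, n2, o, none⟩ ts
       let c := if m then v else if HL ts then v * 100 else v
       if d || hasOpL ts then (r.1 + c, r.2.1, r.2.2) else (r.1, r.2.1, r.2.2 + c)) := by
  induction ts generalizing n1 n2 o v m d with
  | nil =>
    by_cases hd : d <;> by_cases hm : m <;>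
      simp [finB, commitPending, hasOpL, HL, hd, hm]
  | cons w ts ih =>
    rw [finB_cons, finB_cons, stepB, stepB, hasOpL_cons]
    by_cases hby : w = "by"
    · subst hby; simp [get?_by, HL, ih]
    by_cases hh : w = "hundred"
    · subst hh
      simp only [if_neg hby, if_pos rfl, get?_hundred, Option.isSome_none, Bool.false_or]
      by_cases hm : m
      · simpa [HL, hm] using ih n1 n2 o v m d
      · simpa [HL, hm] using ih n1 n2 o (v * 100) true d
    simp only [if_neg hby, if_neg hh]
    cases hop : PySem.Dict.get? strOperationsD w with
    | some u =>
      simpa [HL, hby, hh, hop] using ih (n1 + n2) 0 (some (o.getD u)) v m true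
    | none =>
      by_cases hd : d
      · have h1 := finB_n1_add ts n1 n2 o (some (PySem.Dict.getD strNumD w 0, false, false)) v
        by_cases hm : m <;>
          simp [commitPending, hd, HL, hby, hh, hop, hm, h1]
      · have h2 := finB_n2_add ts n1 n2 o (some (PySem.Dict.getD strNumD w 0, false, false)) v
        by_cases hm : m <;>
          by_cases ho : hasOpL ts <;>
            simp [commitPending, hd, HL, hby, hh, hop, hm, ho, h2]

lemma main_equiv (l : List String) :
    ((foldA l).n1, (foldA l).op, (foldA l).n2) = finB ⟨0, 0, none, none⟩ l := by
  induction l with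
  | nil => rfl
  | cons t ts ih =>
    rw [foldA_cons, finB_cons, stepA, stepB]
    by_cases hby : t = "by"
    · simpa [hby] using ih
    by_cases hh : t = "hundred"
    · simpa [hby, hh] using ih
    simp only [if_neg hby, if_neg hh]
    cases hop : PySem.Dict.get? strOperationsD t with
    | some v =>
      simp only [Option.getD, Option.map]
      rw [finB_op_some]
      simp [← ih]
    | none =>
      simp only [commitPending]
      rw [finB_pending]
      rw [foldA_found, foldA_hund]
      by_cases hf : hasOpL ts <;> by_cases hd : HL ts <;>
        simp [hf, hd, parse_str_to_number, ← ih, mul_comm]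

-- ===== VERDICT (by name: the statement is the Claim_ definition above) =====
theorem parse_str_operation_spec : Claim_equal_parse_str_operation := by
  intro str_op _
  show parse_str_operation str_op = parse_str_operation_alt str_op
  exact main_equiv (PySem.List.slice (PySem.Str.split₀ str_op) none (some (-2)))
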